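-- pv_equiv track=rewrite | github.com/Enrique005XD/temp | Feature Extraction Code/Feature Extraction Code/Feature Extraction code.py | DelimiterCount
-- ===== SOURCE A (Python) =====
-- def DelimiterCount(str):
--     # Initializing count variable to 0
--     count = 0
--
--     # Creating a set of Delimiter Characters
--     delim = set("(){}[]<>'\"")
--
--     # Loop to traverse the num
--     # in the given string
--     for num in str:
--
--         # If Delimiter Character is present
--         # in set delimiter
--         if num in delim:
--             count = count + 1
--
--     str1 = str.lower()
--     # In string, what is the count that <? occurs
--     a = str1.count("<?")
--     if a != 0:
--         count = count-a
--
--     str2 = str.lower()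
--     # In string, what is the count that ?> occurs
--     b = str2.count("?>")
--     if b != 0:
--         count = count-b
--
--     str3 = str.lower()
--     # In string, what is the count that <% occurs
--     c = str3.count("<%")
--     if c != 0:
--         count = count - c
--
--     str4 = str.lower()
--     # In string, what is the count that %> occurs
--     d = str4.count("%>")
--     if d != 0:
--         count = count - d
--
--     str5 = str.lower()
--     # In string, what is the count that /* occurs
--     e = str5.count("/*")
--
--     str6 = str.lower()
--     # In string, what is the count that */ occurs
--     f = str6.count("*/")
--
--     return count+a+b+c+d+e+f
-- ===== SOURCE B (Python) =====
-- def DelimiterCount(str):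
--     # One forward pass: count delimiter characters and '/*' '*/' adjacent pairs.
--     delim = set("(){}[]<>'\"")
--     total = 0
--     prev = None
--     for ch in str:
--         if ch in delim:
--             total += 1
--         if (prev == '/' and ch == '*') or (prev == '*' and ch == '/'):
--             total += 1
--         prev = ch
--     return total
-- ===== Notes on version B (the rewrite author's own statement) =====
-- stated objective: simpler
-- what changed: Replaces A's loop plus six separate substring .count scans (whose <?,?>,<%,%> terms cancel out) with a single forward pass keeping a previous-character variable that counts delimiters and the '/*','*/' pairs at once.
import Mathlib
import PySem

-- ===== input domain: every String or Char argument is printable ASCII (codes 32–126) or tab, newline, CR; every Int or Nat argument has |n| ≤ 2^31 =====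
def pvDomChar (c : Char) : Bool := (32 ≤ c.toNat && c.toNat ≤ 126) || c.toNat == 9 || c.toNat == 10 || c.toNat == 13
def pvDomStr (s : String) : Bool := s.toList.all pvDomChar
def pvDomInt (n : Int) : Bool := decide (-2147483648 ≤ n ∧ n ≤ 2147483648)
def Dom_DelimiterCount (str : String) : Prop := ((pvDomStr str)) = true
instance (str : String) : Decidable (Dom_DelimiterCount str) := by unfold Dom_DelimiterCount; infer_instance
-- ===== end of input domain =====

-- B replaces A's delimiter loop plus six substring .count scans (the <?,?>,<%,%> terms cancel) by one pass with a previous-character variable; same values everywhere.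

-- ===== PORT A =====
def DelimiterCount (str : String) : Int :=
  let delim : PySem.Set Char := PySem.Set.ofList "(){}[]<>'\"".toList
  let count : Int := str.toList.foldl (fun count num => if PySem.Set.contains delim num then count + 1 else count) 0
  let str1 := PySem.Str.lower str
  let a : Int := (PySem.Str.count str1 "<?" : Int)
  let count := if a ≠ 0 then count - a else count
  let str2 := PySem.Str.lower str
  let b : Int := (PySem.Str.count str2 "?>" : Int)
  let count := if b ≠ 0 then count - b else count
  let str3 := PySem.Str.lower str
  let c : Int := (PySem.Str.count str3 "<%" : Int)
  let count := if c ≠ 0 then count - c else count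
  let str4 := PySem.Str.lower str
  let d : Int := (PySem.Str.count str4 "%>" : Int)
  let count := if d ≠ 0 then count - d else count
  let str5 := PySem.Str.lower str
  let e : Int := (PySem.Str.count str5 "/*" : Int)
  let str6 := PySem.Str.lower str
  let f : Int := (PySem.Str.count str6 "*/" : Int)
  count + a + b + c + d + e + f

-- ===== PORT B =====
def DelimiterCount_alt (str : String) : Int :=
  let delim : PySem.Set Char := PySem.Set.ofList "(){}[]<>'\"".toList
  (str.toList.foldl
    (fun s ch =>
      let t := if PySem.Set.contains delim ch then s.2 + 1 else s.2
      let t := if (s.1 = some '/' ∧ ch = '*') ∨ (s.1 = some '*' ∧ ch = '/') then t + 1 else t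
      (some ch, t))
    ((none : Option Char), (0 : Int))).2

-- ===== PRECONDITION & SPEC =====
def Spec_DelimiterCount (str : String) (out : Int) : Prop := out = DelimiterCount_alt str
instance (str : String) (out : Int) : Decidable (Spec_DelimiterCount str out) := by unfold Spec_DelimiterCount; infer_instance

-- ===== CLAIM (what is proved, stated in full; the proofs are below) =====
def Claim_equal_DelimiterCount : Prop := ∀ (str : String), Dom_DelimiterCount str → Spec_DelimiterCount str (DelimiterCount str)

-- ===== LEMMAS AND PROOFS =====

-- number of adjacent (x,y) pairs in a list
def pvAdj (x y : Char) : List Char → Nat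
  | a :: b :: t => (if a = x ∧ b = y then 1 else 0) + pvAdj x y (b :: t)
  | _ => 0

theorem pvAdj_cons_ne (x y a : Char) (l : List Char) (h : a ≠ x) :
    pvAdj x y (a :: l) = pvAdj x y l := by
  cases l with
  | nil => simp [pvAdj]
  | cons b t => simp [pvAdj, h]

theorem count_go_eq (x y : Char) (hxy : x ≠ y) :
    ∀ (fuel : Nat) (l : List Char) (acc : Nat), l.length ≤ fuel →
      PySem.Chars.count.go [x, y] fuel l acc = acc + pvAdj x y l := by
  intro fuel
  induction fuel with
  | zero =>
    intro l acc h
    have : l = [] := List.length_eq_zero_iff.mp (Nat.le_zero.mp h)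
    subst this; simp [PySem.Chars.count.go, pvAdj]
  | succ n ih =>
    intro l acc h
    cases l with
    | nil => simp [PySem.Chars.count.go, pvAdj]
    | cons a t =>
      rw [show PySem.Chars.count.go [x, y] (n+1) (a :: t) acc =
        (if List.isPrefixOf [x, y] (a :: t) then
          PySem.Chars.count.go [x, y] n (List.drop 2 (a :: t)) (acc + 1)
        else PySem.Chars.count.go [x, y] n t acc) from rfl]
      by_cases hp : List.isPrefixOf [x, y] (a :: t)
      · cases t with
        | nil => simp [List.isPrefixOf] at hp
        | cons b t' =>
          have hab : x = a ∧ y = b := by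
            simpa [List.isPrefixOf] using hp
          obtain ⟨hax, hby⟩ := hab
          subst hax; subst hby
          rw [if_pos hp]
          rw [show List.drop 2 (x :: y :: t') = t' from rfl]
          have hlen : t'.length ≤ n := by simp at h; omega
          rw [ih t' (acc + 1) hlen]
          rw [show pvAdj x y (x :: y :: t') = 1 + pvAdj x y (y :: t') from by simp [pvAdj]]
          rw [pvAdj_cons_ne x y y t' (Ne.symm hxy)]
          omega
      · rw [if_neg hp, ih t acc (by simp at h; omega)]
        cases t with
        | nil => simp [pvAdj]
        | cons b t' =>
          have hno : ¬(a = x ∧ b = y) := by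
            rintro ⟨h1, h2⟩; subst h1; subst h2
            exact hp (by simp [List.isPrefixOf])
          simp [pvAdj, hno]

theorem count_eq_pvAdj (x y : Char) (hxy : x ≠ y) (l : List Char) :
    PySem.Chars.count l [x, y] = pvAdj x y l := by
  rw [show PySem.Chars.count l [x, y] = PySem.Chars.count.go [x, y] l.length l 0 from rfl]
  simpa using count_go_eq x y hxy l.length l 0 (le_refl _)

theorem pvAdj_map (x y : Char) (f : Char → Char)
    (hx : ∀ c, f c = x ↔ c = x) (hy : ∀ c, f c = y ↔ c = y) (l : List Char) :
    pvAdj x y (l.map f) = pvAdj x y l := by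
  induction l with
  | nil => rfl
  | cons a t ih =>
    cases t with
    | nil => rfl
    | cons b t' =>
      simp only [List.map, pvAdj] at ih ⊢
      rw [ih]
      congr 1
      by_cases h : a = x ∧ b = y
      · rw [if_pos ⟨(hx a).mpr h.1, (hy b).mpr h.2⟩, if_pos h]
      · rw [if_neg (fun hc => h ⟨(hx a).mp hc.1, (hy b).mp hc.2⟩), if_neg h]

theorem lowerChar_fix (x : Char) (hx1 : x.toNat < 65 ∨ 90 < x.toNat) (hx2 : x.toNat < 97 ∨ 122 < x.toNat) :
    ∀ c, PySem.Chars.lowerChar c = x ↔ c = x := by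
  intro c
  constructor
  · intro h
    unfold PySem.Chars.lowerChar at h
    split at h
    · exfalso
      rename_i hu
      simp only [PySem.Chars.isupper, Bool.and_eq_true, decide_eq_true_eq] at hu
      have hb : 65 ≤ c.toNat ∧ c.toNat ≤ 90 := by
        obtain ⟨h1, h2⟩ := hu
        rw [Char.le_def, UInt32.le_iff_toNat_le] at h1 h2
        exact ⟨h1, h2⟩
      have this : (Char.ofNat (c.toNat + 32)).toNat = c.toNat + 32 := by
        rw [Char.toNat_ofNat, if_pos (Or.inl (by omega) : Nat.isValidChar (c.toNat + 32))]
      have hxn : x.toNat = c.toNat + 32 := by rw [← h, this]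
      omega
    · exact h
  · intro h
    subst h
    unfold PySem.Chars.lowerChar
    rw [if_neg]
    simp only [PySem.Chars.isupper, Bool.and_eq_true, decide_eq_true_eq, not_and]
    intro h1 h2
    rw [Char.le_def, UInt32.le_iff_toNat_le] at h1 h2
    have e1 : ('A' : Char).val.toNat = 65 := by decide
    have e2 : ('Z' : Char).val.toNat = 90 := by decide
    have ec : c.toNat = c.val.toNat := rfl
    omega

-- B's fold invariant
theorem b_fold (delim : PySem.Set Char) :
    ∀ (l : List Char) (p : Option Char) (acc : Int),
      (l.foldl
        (fun s ch =>
          let t := if PySem.Set.contains delim ch then s.2 + 1 else s.2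
          let t := if (s.1 = some '/' ∧ ch = '*') ∨ (s.1 = some '*' ∧ ch = '/') then t + 1 else t
          (some ch, t))
        (p, acc)).2
      = acc + (l.countP (fun ch => PySem.Set.contains delim ch) : Int)
          + (pvAdj '/' '*' (match p with | none => l | some c => c :: l) : Int)
          + (pvAdj '*' '/' (match p with | none => l | some c => c :: l) : Int) := by
  intro l
  induction l with
  | nil =>
    intro p acc
    cases p with
    | none => simp [pvAdj]
    | some c => simp [pvAdj]
  | cons ch t ih =>
    intro p acc
    rw [List.foldl_cons, ih]
    have hcnt : (List.countP (fun ch => PySem.Set.contains delim ch) (ch :: t) : Int)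
        = (if PySem.Set.contains delim ch then 1 else 0) + (List.countP (fun ch => PySem.Set.contains delim ch) t : Int) := by
      rw [List.countP_cons]
      by_cases h : PySem.Set.contains delim ch = true
      · simp only [h, if_pos]; push_cast; ring
      · simp only [h, if_false, Bool.false_eq_true]; push_cast [h]; ring
    cases p with
    | none =>
      rw [hcnt]
      simp only [reduceCtorEq, false_and, or_self, if_false]
      split_ifs <;> ring
    | some b =>
      have h1 : (pvAdj '/' '*' (b :: ch :: t) : Int)
          = (if b = '/' ∧ ch = '*' then 1 else 0) + (pvAdj '/' '*' (ch :: t) : Int) := by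
        rw [show pvAdj '/' '*' (b :: ch :: t)
            = (if b = '/' ∧ ch = '*' then 1 else 0) + pvAdj '/' '*' (ch :: t) from rfl]
        split_ifs <;> push_cast <;> ring
      have h2 : (pvAdj '*' '/' (b :: ch :: t) : Int)
          = (if b = '*' ∧ ch = '/' then 1 else 0) + (pvAdj '*' '/' (ch :: t) : Int) := by
        rw [show pvAdj '*' '/' (b :: ch :: t)
            = (if b = '*' ∧ ch = '/' then 1 else 0) + pvAdj '*' '/' (ch :: t) from rfl]
        split_ifs <;> push_cast <;> ring
      rw [hcnt, h1, h2]
      split_ifs <;> simp_all <;> ring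

-- ===== VERDICT (by name: the statement is the Claim_ definition above) =====
theorem DelimiterCount_spec : Claim_equal_DelimiterCount := by
  intro str _
  unfold Spec_DelimiterCount DelimiterCount DelimiterCount_alt
  simp only []
  rw [b_fold]
  have hslash : ∀ c, PySem.Chars.lowerChar c = '/' ↔ c = '/' :=
    lowerChar_fix '/' (by left; decide) (by left; decide)
  have hstar : ∀ c, PySem.Chars.lowerChar c = '*' ↔ c = '*' :=
    lowerChar_fix '*' (by left; decide) (by left; decide)
  have he : PySem.Str.count (PySem.Str.lower str) "/*" = pvAdj '/' '*' str.toList := by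
    rw [PySem.Str.count_eq, PySem.Str.toList_lower]
    rw [show ("/*" : String).toList = ['/', '*'] from rfl]
    rw [count_eq_pvAdj '/' '*' (by decide)]
    exact pvAdj_map '/' '*' PySem.Chars.lowerChar hslash hstar _
  have hf : PySem.Str.count (PySem.Str.lower str) "*/" = pvAdj '*' '/' str.toList := by
    rw [PySem.Str.count_eq, PySem.Str.toList_lower]
    rw [show ("*/" : String).toList = ['*', '/'] from rfl]
    rw [count_eq_pvAdj '*' '/' (by decide)]
    exact pvAdj_map '*' '/' PySem.Chars.lowerChar hstar hslash _
  rw [he, hf]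
  rw [PySem.List.foldl_if_add_one]
  rw [show (match (none : Option Char) with
      | none => str.toList | some c => c :: str.toList) = str.toList from rfl]
  rw [show (fun ch => (PySem.Set.ofList "(){}[]<>'\"".toList).contains ch)
      = (PySem.Set.ofList "(){}[]<>'\"".toList).contains from rfl]
  split_ifs <;> omega
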